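-- pv_equiv track=rewrite | github.com/alinacimpan/lab-2-alinacimpan | main.py | is_antipalindrome
-- ===== SOURCE A (Python) =====
-- def is_antipalindrome(n):
--     copie_n = n
--     #fac o copie a numarului n pentru a putea compara cifrele egal departate ale numarului cu cele ale inversului sau
--     invers = 0
--     contor_cifre = 0
--     while (n>0):
--         ultima_cifra = n%10
--         invers = invers*10 + ultima_cifra
--         n = n//10
--         contor_cifre = contor_cifre +1
--         #contorizez numarul de cifre
--     contor_cifre = contor_cifre //2
--     #accesez cifrele doar pana la jumatatea numarului
--     while (contor_cifre >0):
--         if(copie_n%10==invers%10):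
--             return False
--         copie_n = copie_n //10
--         invers = invers //10
--         contor_cifre = contor_cifre - 1
--     return True
-- ===== SOURCE B (Python) =====
-- def is_antipalindrome(n):
--     ds = []
--     while n > 0:
--         ds.append(n % 10)
--         n //= 10
--     k = len(ds)
--     return all(ds[i] != ds[k - 1 - i] for i in range(k // 2))
-- ===== Notes on version B (the rewrite author's own statement) =====
-- stated objective: simpler
-- what changed: B collects the digits into a list in one pass and compares mirrored positions by direct indexing, instead of A's pass that builds a reversed number and digit count followed by a second arithmetic loop peeling both numbers digit by digit.
import Mathlib
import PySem

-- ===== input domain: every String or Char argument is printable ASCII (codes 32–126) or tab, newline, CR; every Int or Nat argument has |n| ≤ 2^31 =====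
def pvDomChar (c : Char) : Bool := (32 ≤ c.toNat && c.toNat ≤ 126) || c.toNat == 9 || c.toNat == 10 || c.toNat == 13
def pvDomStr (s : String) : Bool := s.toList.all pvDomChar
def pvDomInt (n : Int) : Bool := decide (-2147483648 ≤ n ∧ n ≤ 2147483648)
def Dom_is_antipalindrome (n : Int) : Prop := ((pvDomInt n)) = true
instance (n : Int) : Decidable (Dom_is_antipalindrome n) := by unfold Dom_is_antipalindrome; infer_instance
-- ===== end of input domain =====

-- B replaces A's reversed-number construction and second peeling loop by a digit list compared at mirrored indices (simpler, same cost).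


-- ===== PORT A =====
-- first while loop: build the reversed number and the digit count
def pvA_rev (n invers contor : Int) : Int × Int :=
  if h : n > 0 then
    pvA_rev (PySem.Int.floordiv n 10) (invers * 10 + PySem.Int.mod n 10) (contor + 1)
  else (invers, contor)
termination_by n.toNat
decreasing_by
  rw [PySem.Int.floordiv_eq_ediv_of_pos (by omega)]
  omega

-- second while loop: compare equally distant digits of n and its reverse
def pvA_cmp (copie invers contor : Int) : Bool :=
  if _h : contor > 0 then
    if PySem.Int.mod copie 10 == PySem.Int.mod invers 10 then false
    else pvA_cmp (PySem.Int.floordiv copie 10) (PySem.Int.floordiv invers 10) (contor - 1)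
  else true
termination_by contor.toNat
decreasing_by omega

def is_antipalindrome (n : Int) : Bool :=
  let p := pvA_rev n 0 0
  pvA_cmp n p.1 (PySem.Int.floordiv p.2 2)

-- ===== PORT B =====
-- the while loop of Source B: the list of digits, least significant first
def pvB_digits (n : Int) : List Int :=
  if _h : n > 0 then PySem.Int.mod n 10 :: pvB_digits (PySem.Int.floordiv n 10) else []
termination_by n.toNat
decreasing_by
  rw [PySem.Int.floordiv_eq_ediv_of_pos (by omega)]
  omega

def is_antipalindrome_alt (n : Int) : Bool :=
  let ds := pvB_digits n
  let k : Int := ds.length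
  -- indices i and k-1-i are always in range, so pyGetD is exact for Python's ds[i]
  (PySem.List.pyRange 0 (PySem.Int.floordiv k 2) 1).all
    (fun i => !(PySem.List.pyGetD ds i 0 == PySem.List.pyGetD ds (k - 1 - i) 0))

-- ===== PRECONDITION & SPEC =====
def Spec_is_antipalindrome (n : Int) (out : Bool) : Prop := out = is_antipalindrome_alt n
instance (n : Int) (out : Bool) : Decidable (Spec_is_antipalindrome n out) := by unfold Spec_is_antipalindrome; infer_instance

-- ===== CLAIM (what is proved, stated in full; the proofs are below) =====
def Claim_equal_is_antipalindrome : Prop := ∀ (n : Int), Dom_is_antipalindrome n → Spec_is_antipalindrome n (is_antipalindrome n)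

-- ===== LEMMAS AND PROOFS =====

-- value of a least-significant-first digit list
def pvVal : List Int → Int
  | [] => 0
  | d :: t => d + 10 * pvVal t

theorem pvB_digits_pos (n : Int) (h : n > 0) :
    pvB_digits n = PySem.Int.mod n 10 :: pvB_digits (PySem.Int.floordiv n 10) := by
  rw [pvB_digits]; simp [h]

theorem pvB_digits_nonpos (n : Int) (h : ¬ n > 0) : pvB_digits n = [] := by
  rw [pvB_digits]; simp [h]

theorem pvVal_digits (n : Int) (h : 0 ≤ n) : pvVal (pvB_digits n) = n := by
  by_cases hp : n > 0
  · rw [pvB_digits_pos n hp, pvVal]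
    have h10 : (0:Int) < 10 := by omega
    have hdiv : 0 ≤ PySem.Int.floordiv n 10 := by
      rw [PySem.Int.floordiv_eq_ediv_of_pos h10]; omega
    have ih := pvVal_digits (PySem.Int.floordiv n 10) hdiv
    rw [ih, PySem.Int.floordiv_eq_ediv_of_pos h10, PySem.Int.mod_eq_emod_of_pos h10]
    omega
  · rw [pvB_digits_nonpos n hp, pvVal]; omega
termination_by n.toNat
decreasing_by
  rw [PySem.Int.floordiv_eq_ediv_of_pos (by omega)]
  omega

theorem pvB_digits_range (n : Int) : ∀ d ∈ pvB_digits n, 0 ≤ d ∧ d < 10 := by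
  by_cases hp : n > 0
  · rw [pvB_digits_pos n hp]
    intro d hd
    rcases List.mem_cons.mp hd with h | h
    · subst h
      rw [PySem.Int.mod_eq_emod_of_pos (by omega)]
      omega
    · exact pvB_digits_range (PySem.Int.floordiv n 10) d h
  · rw [pvB_digits_nonpos n hp]; simp
termination_by n.toNat
decreasing_by
  rw [PySem.Int.floordiv_eq_ediv_of_pos (by omega)]
  omega

-- A's first loop, in terms of B's digit list
theorem pvA_rev_spec (n invers contor : Int) :
    pvA_rev n invers contor =
      ((pvB_digits n).foldl (fun a d => a * 10 + d) invers,
       contor + (pvB_digits n).length) := by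
  by_cases hp : n > 0
  · rw [pvA_rev, pvB_digits_pos n hp]
    simp only [hp, dite_true]
    rw [pvA_rev_spec (PySem.Int.floordiv n 10)]
    simp [List.foldl_cons]
    omega
  · rw [pvA_rev, pvB_digits_nonpos n hp]
    simp [hp]
termination_by n.toNat
decreasing_by
  rw [PySem.Int.floordiv_eq_ediv_of_pos (by omega)]
  omega

theorem pvVal_append (xs : List Int) (d : Int) :
    pvVal (xs ++ [d]) = pvVal xs + d * 10 ^ xs.length := by
  induction xs with
  | nil => simp [pvVal]
  | cons a t ih => simp [pvVal, ih]; ring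

theorem pvFoldl_val (ds : List Int) : ∀ i : Int,
    ds.foldl (fun a d => a * 10 + d) i = pvVal ds.reverse + i * 10 ^ ds.length := by
  induction ds with
  | nil => intro i; simp [pvVal]
  | cons a t ih =>
    intro i
    rw [List.foldl_cons, ih, List.reverse_cons, pvVal_append]
    simp [List.length_reverse]
    ring

-- head/tail of pvVal under Python's % and //
theorem pvVal_mod (a : Int) (t : List Int) (h0 : 0 ≤ a) (h9 : a < 10) :
    PySem.Int.mod (pvVal (a :: t)) 10 = a := by
  rw [PySem.Int.mod_eq_emod_of_pos (by omega), pvVal]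
  omega

theorem pvVal_div (a : Int) (t : List Int) (h0 : 0 ≤ a) (h9 : a < 10) :
    PySem.Int.floordiv (pvVal (a :: t)) 10 = pvVal t := by
  rw [PySem.Int.floordiv_eq_ediv_of_pos (by omega), pvVal]
  omega

-- A's second loop, as a mirrored-index comparison of two digit lists
theorem pvA_cmp_spec : ∀ (m : Nat) (xs ys : List Int),
    (∀ d ∈ xs, 0 ≤ d ∧ d < 10) → (∀ d ∈ ys, 0 ≤ d ∧ d < 10) →
    m ≤ xs.length → m ≤ ys.length →
    pvA_cmp (pvVal xs) (pvVal ys) (m : Int) =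
      (List.range m).all (fun i => !(xs.getD i 0 == ys.getD i 0)) := by
  intro m
  induction m with
  | zero => intro xs ys _ _ _ _; rw [pvA_cmp]; simp
  | succ m ih =>
    intro xs ys hx hy hmx hmy
    match xs, ys with
    | a :: xs', b :: ys' =>
      have ha := hx a (by simp)
      have hb := hy b (by simp)
      rw [pvA_cmp]
      have hc : ((m : Int) + 1) > 0 := by omega
      simp only [Nat.cast_succ, hc, dite_true]
      rw [pvVal_mod a xs' ha.1 ha.2, pvVal_mod b ys' hb.1 hb.2,
          pvVal_div a xs' ha.1 ha.2, pvVal_div b ys' hb.1 hb.2]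
      have hrec : (m : Int) + 1 - 1 = (m : Int) := by omega
      rw [hrec, ih xs' ys' (fun d hd => hx d (by simp [hd])) (fun d hd => hy d (by simp [hd]))
            (by simpa using hmx) (by simpa using hmy)]
      rw [List.range_succ_eq_map]
      by_cases hab : a = b
      · simp [hab]
      · simp [hab, List.all_map, Function.comp_def]

-- reversed list at mirrored index
theorem pvGetD_reverse (ds : List Int) (i : Nat) (h : i < ds.length) :
    ds.reverse.getD i 0 = ds.getD (ds.length - 1 - i) 0 := by
  rw [List.getD_eq_getElem ds.reverse 0 (by simpa using h),
      List.getD_eq_getElem ds 0 (by omega)]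
  rw [List.getElem_reverse]

-- ===== VERDICT (by name: the statement is the Claim_ definition above) =====
theorem is_antipalindrome_spec : Claim_equal_is_antipalindrome := by
  intro n _
  unfold Spec_is_antipalindrome is_antipalindrome is_antipalindrome_alt
  by_cases hp : n > 0
  · have hds := pvB_digits_pos n hp
    set ds := pvB_digits n with hdsdef
    have hval : pvVal ds = n := pvVal_digits n (by omega)
    have hrange := pvB_digits_range n
    rw [pvA_rev_spec]
    simp only [zero_add]
    rw [pvFoldl_val]
    simp only [zero_mul, add_zero]
    have hlen : (ds.length : Int) = (ds.length : Nat) := rfl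
    -- contor // 2
    have hfd : PySem.Int.floordiv (ds.length : Int) 2 = ((ds.length / 2 : Nat) : Int) := by
      exact_mod_cast PySem.Int.floordiv_natCast ds.length 2
    rw [← hdsdef, hfd]
    -- A side via pvA_cmp_spec with xs = ds, ys = ds.reverse, m = len/2
    have hxr : ∀ d ∈ ds.reverse, 0 ≤ d ∧ d < 10 := by
      intro d hd; exact hrange d (List.mem_reverse.mp hd)
    have hA := pvA_cmp_spec (ds.length / 2) ds ds.reverse hrange hxr
      (Nat.div_le_self _ _ |>.trans (le_refl _)) (by simp [List.length_reverse]; exact Nat.div_le_self _ _)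
    rw [hval] at hA
    rw [hA]
    -- B side: pyRange over casts of List.range
    rw [PySem.List.pyRange_zero_natCast]
    rw [List.all_map]
    refine Bool.eq_iff_iff.mpr ?_
    simp only [List.all_eq_true]
    refine forall_congr' fun i => imp_congr_right fun hi => ?_
    have hi2 : i < ds.length / 2 := List.mem_range.mp hi
    have hilen : i < ds.length := by omega
    have hlen1 : 1 ≤ ds.length := by omega
    simp only [Function.comp]
    have h1 : PySem.List.pyGetD ds (i : Int) 0 = ds.getD i 0 := by
      rw [PySem.List.pyGetD_natCast]
    have hcast : (ds.length : Int) - 1 - (i : Int) = ((ds.length - 1 - i : Nat) : Int) := by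
      omega
    have h2 : PySem.List.pyGetD ds ((ds.length : Int) - 1 - (i : Int)) 0
        = ds.getD (ds.length - 1 - i) 0 := by
      rw [hcast, PySem.List.pyGetD_natCast]
    rw [h1, h2, pvGetD_reverse ds i hilen]
  · rw [pvA_rev]
    simp only [hp, dite_false]
    rw [pvB_digits_nonpos n hp]
    rw [pvA_cmp]
    simp [PySem.Int.floordiv, PySem.List.pyRange]
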